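-- pv_equiv track=rewrite | github.com/sfcl/PDFdivisor | algo2.py | veiw_smart_range
-- ===== SOURCE A (Python) =====
-- def veiw_smart_range(list_buttons, max_num_page):
--     diap = []
--     sbuttons = list_buttons[:]
--     sbuttons.append(1)
--     sbuttons.append(max_num_page)
--
--     sbuttons.sort()
--     max = len(sbuttons)
--
--     for i in range(max-1):
--         if len(sbuttons) == 0:
--             break
--
--         elif sbuttons[0] == sbuttons[1]:
--             diap.append((sbuttons[0], sbuttons[0],))
--             tmp = sbuttons[0]
--             del sbuttons[0:2:1]
--             sbuttons.append(tmp+1)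
--             sbuttons.sort()
--
--         elif sbuttons[0] == sbuttons[1] - 1:
--             diap.append((sbuttons[0], sbuttons[1],))
--             tmp = sbuttons[1]
--             del sbuttons[0:2:1]
--             sbuttons.append(tmp+1)
--             sbuttons.sort()
--
--         elif sbuttons[0] < (sbuttons[1] - 1):
--             diap.append((sbuttons[0], sbuttons[1],))
--             tmp = sbuttons[1]
--             del sbuttons[0:2:1]
--             sbuttons.append(tmp+1)
--             sbuttons.sort()
--
--
--     return diap
-- ===== SOURCE B (Python) =====
-- def _pop_min(s, i, pushed, j):
--     if i < len(s) and (j >= len(pushed) or s[i] <= pushed[j]):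
--         return s[i], i + 1, j
--     return pushed[j], i, j + 1
--
--
-- def veiw_smart_range(list_buttons, max_num_page):
--     s = sorted(list_buttons + [1, max_num_page])
--     diap = []
--     pushed = []
--     i = 0
--     j = 0
--     for _ in range(len(s) - 1):
--         a, i, j = _pop_min(s, i, pushed, j)
--         b, i, j = _pop_min(s, i, pushed, j)
--         diap.append((a, b))
--         pushed.append(b + 1)
--     return diap
-- ===== Notes on version B (the rewrite author's own statement) =====
-- stated objective: faster
-- what changed: A re-sorts the whole button list after every emitted range; B sorts once and then runs a two-pointer merge of the sorted input with the FIFO queue of pushed values (which is provably nondecreasing), so each of the n iterations is O(1).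
import Mathlib
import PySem

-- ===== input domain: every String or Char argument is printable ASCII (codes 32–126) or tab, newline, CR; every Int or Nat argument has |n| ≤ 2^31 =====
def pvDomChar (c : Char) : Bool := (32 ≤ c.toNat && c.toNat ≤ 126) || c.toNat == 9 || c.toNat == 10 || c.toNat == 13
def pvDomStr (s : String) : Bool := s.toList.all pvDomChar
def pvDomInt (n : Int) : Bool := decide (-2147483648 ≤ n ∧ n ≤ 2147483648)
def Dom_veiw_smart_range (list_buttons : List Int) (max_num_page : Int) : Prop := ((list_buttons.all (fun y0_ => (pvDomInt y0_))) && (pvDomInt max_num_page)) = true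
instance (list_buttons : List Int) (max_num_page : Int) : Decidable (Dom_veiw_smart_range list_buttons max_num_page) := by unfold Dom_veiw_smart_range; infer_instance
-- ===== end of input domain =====

-- B replaces A's re-sort-every-iteration loop by one sort plus a two-pointer merge of the
-- sorted input with the FIFO of pushed values (which is provably nondecreasing): faster by a
-- better algorithm, same return value on every input.

-- ===== PORT A =====
-- A's for-loop: fuel = number of remaining iterations of 'for i in range(max-1)';
-- state = (diap, sbuttons).  Each branch is transliterated separately, in source order.
def aLoop : Nat → List (List Int) → List Int → List (List Int)
  | 0, diap, _ => diap
  | k + 1, diap, sb =>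
    if sb.length = 0 then diap          -- break
    else
      match PySem.List.pyGet? sb 0, PySem.List.pyGet? sb 1 with
      | some s0, some s1 =>
        if s0 = s1 then
          aLoop k (diap ++ [[s0, s0]])
            (PySem.List.sorted (sb.drop 2 ++ [s0 + 1]) (fun x => x) false)
        else if s0 = s1 - 1 then
          aLoop k (diap ++ [[s0, s1]])
            (PySem.List.sorted (sb.drop 2 ++ [s1 + 1]) (fun x => x) false)
        else if s0 < s1 - 1 then
          aLoop k (diap ++ [[s0, s1]])
            (PySem.List.sorted (sb.drop 2 ++ [s1 + 1]) (fun x => x) false)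
        else aLoop k diap sb            -- no branch fires: next loop iteration
      | _, _ => diap                    -- sbuttons[1] would raise IndexError (unreachable: length ≥ 2 throughout, see proof)

def veiw_smart_range (list_buttons : List Int) (max_num_page : Int) : List (List Int) :=
  let sbuttons := PySem.List.sorted (list_buttons ++ [1, max_num_page]) (fun x => x) false
  aLoop (sbuttons.length - 1) [] sbuttons

-- ===== PORT B =====
-- _pop_min(s, i, pushed, j): pop the smaller front of the two sorted sequences.
def popMin (s : List Int) (i : Nat) (pushed : List Int) (j : Nat) : Int × Nat × Nat :=
  if i < s.length ∧ (pushed.length ≤ j ∨ s.getD i 0 ≤ pushed.getD j 0) then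
    (s.getD i 0, i + 1, j)              -- s[i] (index in range by the guard)
  else
    (pushed.getD j 0, i, j + 1)         -- pushed[j] (in range on every reachable state)

-- B's for-loop: state = (diap, i, pushed, j); s never changes.
def bLoop : Nat → List (List Int) → List Int → Nat → List Int → Nat → List (List Int)
  | 0, diap, _, _, _, _ => diap
  | k + 1, diap, s, i, pushed, j =>
    let (a, i1, j1) := popMin s i pushed j
    let (b, i2, j2) := popMin s i1 pushed j1
    bLoop k (diap ++ [[a, b]]) s i2 (pushed ++ [b + 1]) j2

def veiw_smart_range_alt (list_buttons : List Int) (max_num_page : Int) : List (List Int) :=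
  let s := PySem.List.sorted (list_buttons ++ [1, max_num_page]) (fun x => x) false
  bLoop (s.length - 1) [] s 0 [] 0

-- ===== PRECONDITION & SPEC =====
def Spec_veiw_smart_range (list_buttons : List Int) (max_num_page : Int) (out : List (List Int)) : Prop := out = veiw_smart_range_alt list_buttons max_num_page
instance (list_buttons : List Int) (max_num_page : Int) (out : List (List Int)) : Decidable (Spec_veiw_smart_range list_buttons max_num_page out) := by unfold Spec_veiw_smart_range; infer_instance

-- ===== CLAIM (what is proved, stated in full; the proofs are below) =====
def Claim_equal_veiw_smart_range : Prop := ∀ (list_buttons : List Int) (max_num_page : Int), Dom_veiw_smart_range list_buttons max_num_page → Spec_veiw_smart_range list_buttons max_num_page (veiw_smart_range list_buttons max_num_page)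

-- ===== LEMMAS AND PROOFS =====

-- popMin pops the minimum x of the merged multiset and leaves a permutation of the rest.
lemma pop_spec (s pushed : List Int) (i j : Nat) (x : Int) (t : List Int)
    (hs : s.Pairwise (· ≤ ·)) (hp : pushed.Pairwise (· ≤ ·)) (hj : j ≤ pushed.length)
    (hperm : (x :: t).Perm (s.drop i ++ pushed.drop j))
    (hmin : ∀ y ∈ s.drop i ++ pushed.drop j, x ≤ y) :
    ∃ i' j', popMin s i pushed j = (x, i', j') ∧ j' ≤ pushed.length ∧
      t.Perm (s.drop i' ++ pushed.drop j') := by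
  have hsd : (s.drop i).Pairwise (· ≤ ·) := hs.drop
  have hpd : (pushed.drop j).Pairwise (· ≤ ·) := hp.drop
  have hxmem : x ∈ s.drop i ++ pushed.drop j := hperm.mem_iff.mp (List.mem_cons_self ..)
  unfold popMin
  by_cases h : i < s.length ∧ (pushed.length ≤ j ∨ s.getD i 0 ≤ pushed.getD j 0)
  · -- take s[i]
    obtain ⟨hi, hor⟩ := h
    have hgd : s.getD i 0 = s[i] := List.getD_eq_getElem s 0 hi
    have hdropi : s.drop i = s[i] :: s.drop (i + 1) := List.drop_eq_getElem_cons hi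
    have hxle : x ≤ s[i] := hmin _ (by rw [hdropi]; exact List.mem_append_left _ (List.mem_cons_self ..))
    have hle : s[i] ≤ x := by
      rcases List.mem_append.mp hxmem with hx | hx
      · rw [hdropi] at hx
        rcases List.mem_cons.mp hx with hx | hx
        · omega
        · rw [hdropi] at hsd
          exact (List.rel_of_pairwise_cons hsd hx)
      · have hjlt : j < pushed.length := by
          by_contra hge
          simp [List.drop_eq_nil_of_le (by omega : pushed.length ≤ j)] at hx
        have hor' : s.getD i 0 ≤ pushed.getD j 0 := by
          rcases hor with h1 | h1
          · omega
          · exact h1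
        have hpj : pushed.getD j 0 = pushed[j] := List.getD_eq_getElem pushed 0 hjlt
        have hdropj : pushed.drop j = pushed[j] :: pushed.drop (j + 1) := List.drop_eq_getElem_cons hjlt
        rw [hdropj] at hx hpd
        rcases List.mem_cons.mp hx with hx | hx
        · rw [hgd, hpj] at hor'; omega
        · have := List.rel_of_pairwise_cons hpd hx
          rw [hgd, hpj] at hor'; omega
    have hxeq : x = s[i] := le_antisymm hxle hle
    refine ⟨i + 1, j, by rw [if_pos ⟨hi, hor⟩, hgd, ← hxeq], hj, ?_⟩
    have h2 := hperm
    rw [hdropi, List.cons_append, ← hxeq] at h2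
    exact h2.cons_inv
  · -- take pushed[j]
    have hjlt : j < pushed.length := by
      by_cases hi : i < s.length
      · push Not at h
        have := h hi
        omega
      · push Not at hi
        rw [List.drop_eq_nil_of_le hi] at hxmem
        simp at hxmem
        by_contra hge
        simp [List.drop_eq_nil_of_le (by omega : pushed.length ≤ j)] at hxmem
    have hpj : pushed.getD j 0 = pushed[j] := List.getD_eq_getElem pushed 0 hjlt
    have hdropj : pushed.drop j = pushed[j] :: pushed.drop (j + 1) := List.drop_eq_getElem_cons hjlt
    have hxle : x ≤ pushed[j] := hmin _ (by rw [hdropj]; exact List.mem_append_right _ (List.mem_cons_self ..))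
    have hle : pushed[j] ≤ x := by
      rcases List.mem_append.mp hxmem with hx | hx
      · -- x ∈ s.drop i, so i < s.length and pushed[j] < s[i] ≤ x
        have hi : i < s.length := by
          by_contra hge
          rw [List.drop_eq_nil_of_le (by omega : s.length ≤ i)] at hx
          simp at hx
        push Not at h
        have hlt := h hi
        have hgd : s.getD i 0 = s[i] := List.getD_eq_getElem s 0 hi
        have hdropi : s.drop i = s[i] :: s.drop (i + 1) := List.drop_eq_getElem_cons hi
        rw [hdropi] at hx hsd
        have hsi : s[i] ≤ x := by
          rcases List.mem_cons.mp hx with hx | hx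
          · omega
          · exact List.rel_of_pairwise_cons hsd hx
        rw [hgd, hpj] at hlt; omega
      · rw [hdropj] at hx hpd
        rcases List.mem_cons.mp hx with hx | hx
        · omega
        · exact List.rel_of_pairwise_cons hpd hx
    have hxeq : x = pushed[j] := le_antisymm hxle hle
    refine ⟨i, j + 1, by rw [if_neg h, hpj, ← hxeq], by omega, ?_⟩
    rw [hdropj] at hperm
    have h2 := hperm.trans List.perm_middle
    rw [← hxeq] at h2
    exact h2.cons_inv

-- main simulation: A's (re-sorted list) state vs B's (two sorted pointers) state.
lemma loop_eq (k : Nat) : ∀ (diap : List (List Int)) (sb s pushed : List Int) (i j : Nat),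
    sb.Pairwise (· ≤ ·) → s.Pairwise (· ≤ ·) → pushed.Pairwise (· ≤ ·) →
    j ≤ pushed.length →
    sb.Perm (s.drop i ++ pushed.drop j) →
    sb.length = k + 1 →
    (∀ p ∈ pushed, ∀ x ∈ sb, p ≤ x + 1) →
    aLoop k diap sb = bLoop k diap s i pushed j := by
  induction k with
  | zero => intros; rfl
  | succ k ih =>
    intro diap sb s pushed i j hsb hs hp hj hperm hlen hinv
    match sb, hsb, hperm, hlen, hinv with
    | [], _, _, hlen, _ => simp at hlen
    | [a], _, _, hlen, _ => simp at hlen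
    | a :: b :: rest, hsb, hperm, hlen, hinv =>
      have hab : a ≤ b := (List.pairwise_cons.mp hsb).1 b (List.mem_cons_self ..)
      have hbrest : ∀ y ∈ rest, b ≤ y :=
        fun y hy => (List.pairwise_cons.mp (List.pairwise_cons.mp hsb).2).1 y hy
      have harest : ∀ y ∈ b :: rest, a ≤ y :=
        fun y hy => (List.pairwise_cons.mp hsb).1 y hy
      -- every live branch of A emits [a, b] and re-sorts rest ++ [b+1]
      have h0 : PySem.List.pyGet? (a :: b :: rest) 0 = some a := by simp [pysem]
      have h1 : PySem.List.pyGet? (a :: b :: rest) 1 = some b := by simp [pysem]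
      have hA : aLoop (k + 1) diap (a :: b :: rest) =
          aLoop k (diap ++ [[a, b]])
            (PySem.List.sorted (rest ++ [b + 1]) (fun x => x) false) := by
        simp only [aLoop, h0, h1, List.length_cons, List.drop_succ_cons, List.drop_zero]
        rw [if_neg (by omega)]
        by_cases he : a = b
        · rw [if_pos he, he]
        · rw [if_neg he]
          by_cases h2 : a = b - 1
          · rw [if_pos h2]
          · rw [if_neg h2, if_pos (by omega)]
      -- B pops a then b
      have hminA : ∀ y ∈ s.drop i ++ pushed.drop j, a ≤ y := by
        intro y hy
        have hy' : y ∈ a :: b :: rest := hperm.mem_iff.mpr hy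
        rcases List.mem_cons.mp hy' with h | h
        · omega
        · exact harest y h
      obtain ⟨i1, j1, hpop1, hj1, hperm1⟩ :=
        pop_spec s pushed i j a (b :: rest) hs hp hj hperm hminA
      have hminB : ∀ y ∈ s.drop i1 ++ pushed.drop j1, b ≤ y := by
        intro y hy
        have hy' : y ∈ b :: rest := hperm1.mem_iff.mpr hy
        rcases List.mem_cons.mp hy' with h | h
        · omega
        · exact hbrest y h
      obtain ⟨i2, j2, hpop2, hj2, hperm2⟩ :=
        pop_spec s pushed i1 j1 b rest hs hp hj1 hperm1 hminB
      have hB : bLoop (k + 1) diap s i pushed j =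
          bLoop k (diap ++ [[a, b]]) s i2 (pushed ++ [b + 1]) j2 := by
        simp only [bLoop, hpop1, hpop2]
      rw [hA, hB]
      have hd : (pushed ++ [b + 1]).drop j2 = pushed.drop j2 ++ [b + 1] := by
        rw [List.drop_append, show j2 - pushed.length = 0 by omega]
        rfl
      apply ih
      · have := PySem.List.sorted_pairwise (rest ++ [b + 1]) (fun x => x)
        simpa using this
      · exact hs
      · rw [List.pairwise_append]
        refine ⟨hp, List.pairwise_singleton _ _, ?_⟩
        intro p hp' c hc
        rcases List.mem_singleton.mp hc with rfl
        exact hinv p hp' b (by simp)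
      · simp; omega
      · refine (PySem.List.sorted_perm _ _ _).trans ?_
        rw [hd, ← List.append_assoc]
        exact hperm2.append_right [b + 1]
      · rw [PySem.List.length_sorted]
        simp at hlen ⊢
        omega
      · intro p hp' x hx
        have hx' : x ∈ rest ++ [b + 1] := (PySem.List.mem_sorted ..).mp hx
        rcases List.mem_append.mp hp' with hp'' | hp''
        · rcases List.mem_append.mp hx' with hx'' | hx''
          · exact hinv p hp'' x (by simp [hx''])
          · rcases List.mem_singleton.mp hx'' with rfl
            have := hinv p hp'' b (by simp)
            omega
        · rcases List.mem_singleton.mp hp'' with rfl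
          rcases List.mem_append.mp hx' with hx'' | hx''
          · have := hbrest x hx''
            omega
          · rcases List.mem_singleton.mp hx'' with rfl
            omega

-- ===== VERDICT (by name: the statement is the Claim_ definition above) =====
theorem veiw_smart_range_spec : Claim_equal_veiw_smart_range := by
  intro lb m _
  unfold Spec_veiw_smart_range veiw_smart_range veiw_smart_range_alt
  have hlen : (PySem.List.sorted (lb ++ [1, m]) (fun x => x) false).length = lb.length + 2 := by
    simp [PySem.List.length_sorted]
  refine loop_eq _ _ _ _ _ 0 0 ?_ ?_ ?_ ?_ ?_ ?_ ?_
  · exact PySem.List.sorted_pairwise _ _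
  · exact PySem.List.sorted_pairwise _ _
  · exact List.Pairwise.nil
  · simp
  · simp
  · omega
  · intro p hp; simp at hp
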